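-- pv_equiv track=rewrite | github.com/vietlinhh02/vietnamese-fact-checking | src/agent/react_agent.py | _prioritize_urls
-- ===== SOURCE A (Python) =====
-- from typing import Any, Dict, List, Optional
--
-- PRIORITY_DOMAINS = [
--     '.gov.vn',           # Government sources (highest priority)
--     'gso.gov.vn',        # General Statistics Office
--     'chinhphu.vn',       # Government portal
--     'thuvienphapluat.vn', # Legal database
--     'vnexpress.net',     # Major news
--     'tuoitre.vn',
--     'thanhnien.vn',
--     'vtv.vn',
--     'vov.vn',
--     'nhandan.vn',
-- ]
--
-- def _prioritize_urls(urls: List[str]) -> List[str]: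
--     """Prioritize URLs with government and major news sources first.
--
--     Args:
--         urls: List of URLs to prioritize.
--
--     Returns:
--         Sorted list with priority URLs first.
--     """
--     priority_urls = []
--     other_urls = []
--     wikipedia_urls = []
--
--     for url in urls:
--         url_lower = url.lower()
--         if 'wikipedia.org' in url_lower:
--             wikipedia_urls.append(url)
--         elif any(domain in url_lower for domain in PRIORITY_DOMAINS):
--             priority_urls.append(url)
--         else:
--             other_urls.append(url)
--
--     return priority_urls + other_urls + wikipedia_urls
-- ===== SOURCE B (Python) =====
-- from typing import List
--
-- PRIORITY_DOMAINS = [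
--     '.gov.vn',
--     'gso.gov.vn',
--     'chinhphu.vn',
--     'thuvienphapluat.vn',
--     'vnexpress.net',
--     'tuoitre.vn',
--     'thanhnien.vn',
--     'vtv.vn',
--     'vov.vn',
--     'nhandan.vn',
-- ]
--
-- def _rank(url: str) -> int:
--     url_lower = url.lower()
--     if 'wikipedia.org' in url_lower:
--         return 2
--     if any(domain in url_lower for domain in PRIORITY_DOMAINS):
--         return 0
--     return 1
--
-- def _prioritize_urls(urls: List[str]) -> List[str]:
--     return sorted(urls, key=_rank)
-- ===== Notes on version B (the rewrite author's own statement) =====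
-- stated objective: idiomatic
-- what changed: Replaces the three-bucket partition loop and concatenation with a single stable sort by a rank function (wikipedia=2, priority=0, other=1); sort stability reproduces A's within-bucket order.
import Mathlib
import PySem

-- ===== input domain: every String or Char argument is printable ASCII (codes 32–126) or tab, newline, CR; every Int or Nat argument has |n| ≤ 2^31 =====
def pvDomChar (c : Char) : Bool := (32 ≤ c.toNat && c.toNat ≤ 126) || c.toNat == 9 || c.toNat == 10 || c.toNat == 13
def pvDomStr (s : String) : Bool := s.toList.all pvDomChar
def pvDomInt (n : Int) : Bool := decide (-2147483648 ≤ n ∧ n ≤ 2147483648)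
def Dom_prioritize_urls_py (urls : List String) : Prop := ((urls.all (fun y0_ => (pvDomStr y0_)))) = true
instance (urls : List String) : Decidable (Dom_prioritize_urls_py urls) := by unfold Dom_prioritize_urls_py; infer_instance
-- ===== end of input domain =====

-- B replaces A's three-bucket partition loop with a single stable sort by a rank function (alternative decomposition; same behaviour).


-- ===== PORT A =====
def pvPriorityDomains : List String :=
  [".gov.vn", "gso.gov.vn", "chinhphu.vn", "thuvienphapluat.vn", "vnexpress.net",
   "tuoitre.vn", "thanhnien.vn", "vtv.vn", "vov.vn", "nhandan.vn"]

def prioritize_urls_py (urls : List String) : List String :=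
  let st := urls.foldl (fun (acc : List String × List String × List String) url =>
    let ul := PySem.Str.lower url
    if PySem.Str.isIn "wikipedia.org" ul then
      (acc.1, acc.2.1, acc.2.2 ++ [url])
    else if pvPriorityDomains.any (fun domain => PySem.Str.isIn domain ul) then
      (acc.1 ++ [url], acc.2.1, acc.2.2)
    else
      (acc.1, acc.2.1 ++ [url], acc.2.2)) ([], [], [])
  st.1 ++ st.2.1 ++ st.2.2

-- ===== PORT B =====
def pvRank (url : String) : Int :=
  let ul := PySem.Str.lower url
  if PySem.Str.isIn "wikipedia.org" ul then 2
  else if pvPriorityDomains.any (fun domain => PySem.Str.isIn domain ul) then 0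
  else 1

def prioritize_urls_py_alt (urls : List String) : List String :=
  PySem.List.sorted urls pvRank

-- ===== PRECONDITION & SPEC =====
def Spec_prioritize_urls_py (urls : List String) (out : List String) : Prop := out = prioritize_urls_py_alt urls
instance (urls : List String) (out : List String) : Decidable (Spec_prioritize_urls_py urls out) := by unfold Spec_prioritize_urls_py; infer_instance

-- ===== CLAIM (what is proved, stated in full; the proofs are below) =====
def Claim_equal_prioritize_urls_py : Prop := ∀ (urls : List String), Dom_prioritize_urls_py urls → Spec_prioritize_urls_py urls (prioritize_urls_py urls)

-- ===== LEMMAS AND PROOFS =====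

-- branch conditions, shared by both proofs
def pvWiki (u : String) : Bool := PySem.Str.isIn "wikipedia.org" (PySem.Str.lower u)
def pvPrio (u : String) : Bool := pvPriorityDomains.any (fun domain => PySem.Str.isIn domain (PySem.Str.lower u))
def pvC0 (u : String) : Bool := !pvWiki u && pvPrio u
def pvC1 (u : String) : Bool := !pvWiki u && !pvPrio u

lemma rank_eq (u : String) : pvRank u = if pvWiki u then 2 else if pvPrio u then 0 else 1 := rfl

-- A's loop = three filters appended to the accumulators
lemma foldlA (xs : List String) : ∀ (p o w : List String),
    xs.foldl (fun (acc : List String × List String × List String) url =>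
      let ul := PySem.Str.lower url
      if PySem.Str.isIn "wikipedia.org" ul then
        (acc.1, acc.2.1, acc.2.2 ++ [url])
      else if pvPriorityDomains.any (fun domain => PySem.Str.isIn domain ul) then
        (acc.1 ++ [url], acc.2.1, acc.2.2)
      else
        (acc.1, acc.2.1 ++ [url], acc.2.2)) (p, o, w)
    = (p ++ xs.filter pvC0, o ++ xs.filter pvC1, w ++ xs.filter pvWiki) := by
  induction xs with
  | nil => intro p o w; simp
  | cons x xs ih =>
    intro p o w
    by_cases hw : pvWiki x = true
    · simp only [List.foldl_cons]
      rw [show (PySem.Str.isIn "wikipedia.org" (PySem.Str.lower x)) = true from hw]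
      simp only [if_true, ih]
      simp [pvC0, pvC1, hw]
    · by_cases hp : pvPrio x = true
      · simp only [List.foldl_cons]
        rw [show (PySem.Str.isIn "wikipedia.org" (PySem.Str.lower x)) = false from
          (by simpa [pvWiki] using hw)]
        rw [show (pvPriorityDomains.any fun domain => PySem.Str.isIn domain (PySem.Str.lower x)) = true from hp]
        simp only [Bool.false_eq_true, if_false, if_true, ih]
        simp [pvC0, pvC1, hw, hp]
      · simp only [List.foldl_cons]
        rw [show (PySem.Str.isIn "wikipedia.org" (PySem.Str.lower x)) = false from
          (by simpa [pvWiki] using hw)]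
        rw [show (pvPriorityDomains.any fun domain => PySem.Str.isIn domain (PySem.Str.lower x)) = false from
          (by simpa [pvPrio] using hp)]
        simp only [Bool.false_eq_true, if_false, ih]
        simp [pvC0, pvC1, hw, hp]

lemma insertBy_append_of_not {α : Type} (before : α → α → Bool) (x : α) (p ys : List α)
    (h : ∀ y ∈ p, before x y = false) :
    PySem.List.insertBy before x (p ++ ys) = p ++ PySem.List.insertBy before x ys := by
  induction p with
  | nil => simp
  | cons y p ih =>
    have hy : before x y = false := h y (by simp)
    simp only [List.cons_append, PySem.List.insertBy, hy, Bool.false_eq_true, if_false]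
    exact congrArg (y :: ·) (ih (fun z hz => h z (by simp [hz])))

lemma insertBy_front {α : Type} (before : α → α → Bool) (x : α) (ys : List α)
    (h : ∀ y ∈ ys, before x y = true) :
    PySem.List.insertBy before x ys = x :: ys := by
  cases ys with
  | nil => rfl
  | cons y ys => simp [PySem.List.insertBy, h y (by simp)]

-- B's stable insertion sort maintains the bucket decomposition
lemma foldlB (xs : List String) : ∀ (p o w : List String),
    (∀ a ∈ p, pvRank a = 0) → (∀ a ∈ o, pvRank a = 1) → (∀ a ∈ w, pvRank a = 2) →
    xs.foldl (fun acc x => PySem.List.insertBy (fun a b => decide (pvRank a < pvRank b)) x acc)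
      (p ++ o ++ w)
    = (p ++ xs.filter pvC0) ++ (o ++ xs.filter pvC1) ++ (w ++ xs.filter pvWiki) := by
  induction xs with
  | nil => intro p o w _ _ _; simp
  | cons x xs ih =>
    intro p o w hp ho hw
    simp only [List.foldl_cons]
    by_cases hxw : pvWiki x = true
    · have hr : pvRank x = 2 := by simp [rank_eq, hxw]
      have : PySem.List.insertBy (fun a b => decide (pvRank a < pvRank b)) x (p ++ o ++ w)
          = p ++ o ++ (w ++ [x]) := by
        rw [PySem.List.insertBy_of_forall_not_before]
        · simp
        · intro y hy
          simp only [List.mem_append] at hy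
          rcases hy with (hy | hy) | hy
          · simp [hr, hp y hy]
          · simp [hr, ho y hy]
          · simp [hr, hw y hy]
      rw [this, ih p o (w ++ [x]) hp ho
        (by intro a ha; rcases List.mem_append.1 ha with h | h
            · exact hw a h
            · simp only [List.mem_singleton] at h; simpa [h] using hr)]
      simp [pvC0, pvC1, hxw]
    · by_cases hxp : pvPrio x = true
      · have hr : pvRank x = 0 := by simp [rank_eq, hxw, hxp]
        have : PySem.List.insertBy (fun a b => decide (pvRank a < pvRank b)) x (p ++ (o ++ w))
            = (p ++ [x]) ++ (o ++ w) := by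
          rw [insertBy_append_of_not _ _ p (o ++ w) (fun y hy => by simp [hr, hp y hy]),
              insertBy_front _ _ (o ++ w) (fun y hy => by
                rcases List.mem_append.1 hy with h | h
                · simp [hr, ho y h]
                · simp [hr, hw y h])]
          simp
        rw [List.append_assoc, this, ← List.append_assoc,
            ih (p ++ [x]) o w
              (by intro a ha; rcases List.mem_append.1 ha with h | h
                  · exact hp a h
                  · simp only [List.mem_singleton] at h; simpa [h] using hr)
              ho hw]
        simp [pvC0, pvC1, hxw, hxp]
      · have hr : pvRank x = 1 := by simp [rank_eq, hxw, hxp]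
        have : PySem.List.insertBy (fun a b => decide (pvRank a < pvRank b)) x (p ++ o ++ w)
            = p ++ (o ++ [x]) ++ w := by
          rw [List.append_assoc,
              insertBy_append_of_not _ _ p (o ++ w) (fun y hy => by simp [hr, hp y hy]),
              insertBy_append_of_not _ _ o w (fun y hy => by simp [hr, ho y hy]),
              insertBy_front _ _ w (fun y hy => by simp [hr, hw y hy])]
          simp
        rw [this, ih p (o ++ [x]) w hp
              (by intro a ha; rcases List.mem_append.1 ha with h | h
                  · exact ho a h
                  · simp only [List.mem_singleton] at h; simpa [h] using hr)
              hw]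
        simp [pvC0, pvC1, hxw, hxp]

-- ===== VERDICT (by name: the statement is the Claim_ definition above) =====
theorem prioritize_urls_py_spec : Claim_equal_prioritize_urls_py := by
  intro urls _
  unfold Spec_prioritize_urls_py prioritize_urls_py prioritize_urls_py_alt
  rw [PySem.List.sorted_eq_foldl_insertBy]
  have hb := foldlB urls [] [] [] (by simp) (by simp) (by simp)
  simp only [List.append_nil, List.nil_append] at hb
  rw [hb, foldlA urls [] [] []]
  simp
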